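-- pv_equiv track=rewrite | github.com/wonajec2701/hecate | code/multi_source_data/filter_roa.py | checkspepfx
-- ===== SOURCE A (Python) =====
-- def checkspepfx(spemap, pfx, length):
--     pfx_exists = False
--     for pl in range(length, -1, -1):
--         if pl not in spemap:
--             continue
--         t = pfx[:pl]
--         if t in spemap[pl]:
--             pfx_exists = True
--             return pfx_exists
--     return pfx_exists
-- ===== SOURCE B (Python) =====
-- def checkspepfx(spemap, pfx, length):
--     # Single pass over the dict's entries: since the result is only a bool,
--     # the longest-first scan order of A is irrelevant -- any matching entry
--     # with a key in 0..length suffices.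
--     return any(0 <= pl <= length and pfx[:pl] in strs
--                for pl, strs in spemap.items())
-- ===== Notes on version B (the rewrite author's own statement) =====
-- stated objective: idiomatic
-- what changed: B replaces A's descending integer scan from length to 0 (skipping non-keys, returning at the first hit) with a single order-independent any() pass over the dict's entries, which is valid because the return value is only a boolean.
import Mathlib
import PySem

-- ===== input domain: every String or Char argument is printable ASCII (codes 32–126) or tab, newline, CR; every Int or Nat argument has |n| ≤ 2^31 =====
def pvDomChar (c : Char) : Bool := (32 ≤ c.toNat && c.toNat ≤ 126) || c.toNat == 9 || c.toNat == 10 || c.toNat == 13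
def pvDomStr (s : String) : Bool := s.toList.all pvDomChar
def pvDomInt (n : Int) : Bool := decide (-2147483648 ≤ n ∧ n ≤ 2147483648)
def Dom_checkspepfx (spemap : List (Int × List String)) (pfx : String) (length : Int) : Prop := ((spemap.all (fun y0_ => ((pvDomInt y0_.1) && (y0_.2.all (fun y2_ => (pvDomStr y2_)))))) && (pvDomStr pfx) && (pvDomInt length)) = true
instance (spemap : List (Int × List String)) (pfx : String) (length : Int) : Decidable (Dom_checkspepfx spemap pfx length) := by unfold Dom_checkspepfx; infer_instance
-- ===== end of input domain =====

-- B replaces A's descending integer scan (skip non-keys, return at the first hit) by one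
-- order-independent any() pass over the dict's entries; valid because the result is a Bool.

-- ===== PORT A =====
-- the loop 'for pl in range(length, -1, -1): …' with early return
def checkspepfxGo (spemap : List (Int × List String)) (pfx : String) : List Int → Bool
  | [] => false
  | pl :: rest =>
    if ¬ (PySem.Dict.mk spemap).contains pl then checkspepfxGo spemap pfx rest   -- continue
    else
      let t := PySem.Str.slice pfx none (some pl)                                -- t = pfx[:pl]
      if ((PySem.Dict.mk spemap).getD pl []).contains t then true                 -- return True
      else checkspepfxGo spemap pfx rest

def checkspepfx (spemap : List (Int × List String)) (pfx : String) (length : Int) : Bool :=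
  checkspepfxGo spemap pfx (PySem.List.pyRange length (-1) (-1))

-- ===== PORT B =====
-- 'any(0 <= pl <= length and pfx[:pl] in strs for pl, strs in spemap.items())'
def checkspepfx_alt (spemap : List (Int × List String)) (pfx : String) (length : Int) : Bool :=
  ((PySem.Dict.mk spemap).items).any (fun kv =>
    (decide (0 ≤ kv.1) && decide (kv.1 ≤ length)) &&
      kv.2.contains (PySem.Str.slice pfx none (some kv.1)))

-- ===== PRECONDITION & SPEC =====
-- Pre_ excludes association lists with duplicate keys: such a list is not a valid Python
-- dict (Python collapses duplicates on construction), so its behaviour is accidental here.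
def Pre_checkspepfx (spemap : List (Int × List String)) (pfx : String) (length : Int) : Prop :=
  (spemap.map Prod.fst).Nodup
instance (spemap : List (Int × List String)) (pfx : String) (length : Int) : Decidable (Pre_checkspepfx spemap pfx length) := by unfold Pre_checkspepfx; infer_instance

def pvWitness_checkspepfx : (List (Int × List String)) × String × Int := ([(1, ["a"]), (2, ["ab"])], "ab", 2)

def Spec_checkspepfx (spemap : List (Int × List String)) (pfx : String) (length : Int) (out : Bool) : Prop := out = checkspepfx_alt spemap pfx length
instance (spemap : List (Int × List String)) (pfx : String) (length : Int) (out : Bool) : Decidable (Spec_checkspepfx spemap pfx length out) := by unfold Spec_checkspepfx; infer_instance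

-- ===== CLAIM (what is proved, stated in full; the proofs are below) =====
def Claim_equal_checkspepfx : Prop := ∀ (spemap : List (Int × List String)) (pfx : String) (length : Int), Dom_checkspepfx spemap pfx length → Pre_checkspepfx spemap pfx length → Spec_checkspepfx spemap pfx length (checkspepfx spemap pfx length)

-- ===== LEMMAS AND PROOFS =====

theorem checkspepfxGo_eq_any (spemap : List (Int × List String)) (pfx : String) (l : List Int) :
    checkspepfxGo spemap pfx l =
      l.any (fun pl => (PySem.Dict.mk spemap).contains pl &&
        ((PySem.Dict.mk spemap).getD pl []).contains (PySem.Str.slice pfx none (some pl))) := by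
  induction l with
  | nil => rfl
  | cons pl rest ih =>
    simp only [checkspepfxGo, List.any_cons, ih]
    by_cases h : (PySem.Dict.mk spemap).contains pl
    · simp [h]
    · simp [h]

-- ===== VERDICT (by name: the statement is the Claim_ definition above) =====
theorem checkspepfx_spec : Claim_equal_checkspepfx := by
  intro spemap pfx length _ hpre
  have hnodup : ((PySem.Dict.mk spemap).keys).Nodup := by
    simpa [PySem.Dict.keys_mk] using hpre
  unfold Spec_checkspepfx checkspepfx checkspepfx_alt
  rw [checkspepfxGo_eq_any]
  rw [Bool.eq_iff_iff]
  simp only [List.any_eq_true, PySem.List.mem_pyRange_neg_one, Bool.and_eq_true,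
    decide_eq_true_eq, PySem.Dict.contains_iff_mem_keys]
  constructor
  · rintro ⟨pl, ⟨h1, h2⟩, hk, hm⟩
    have : pl ∈ (PySem.Dict.mk spemap).keys := hk
    simp only [PySem.Dict.keys_mk, List.mem_map] at this
    obtain ⟨kv, hkv, hfst⟩ := this
    refine ⟨kv, hkv, ⟨by omega, by omega⟩, ?_⟩
    have hgd := PySem.Dict.getD_of_mem_items (PySem.Dict.mk spemap)
      (k := kv.1) (v := kv.2) (by simpa using hkv) hnodup ([] : List String)
    rw [hfst] at hgd
    rw [hgd] at hm
    simpa [hfst] using hm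
  · rintro ⟨kv, hkv, ⟨h0, h2⟩, hm⟩
    refine ⟨kv.1, ⟨by omega, h2⟩, ?_, ?_⟩
    · exact PySem.Dict.mem_keys_of_mem_items (PySem.Dict.mk spemap) (by simpa using hkv)
    · have hgd := PySem.Dict.getD_of_mem_items (PySem.Dict.mk spemap)
        (k := kv.1) (v := kv.2) (by simpa using hkv) hnodup ([] : List String)
      rw [hgd]; exact hm
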